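-- pv_equiv track=rewrite | github.com/Morgan-DD/GenerateShema | createShema.py | canConnect
-- ===== SOURCE A (Python) =====
-- def canConnect(idStart, idFinal):
--     verification = [["server",["trame","switch","router","firewall","wan","server","client"]],
--                     ["client",["trame","switch","router","firewall","wan","server","client"]],
--                     ["router",["trame","switch","router","firewall","wan","server","client"]],
--                     ["firewall",["trame","switch","router","firewall","wan","server","client"]],
--                     ["switch",["trame","switch","router","firewall","wan","server","client"]],
--                     ["wan",["trame","switch","router","firewall","wan","server","client"]],]
--     for idStartMatch in verification:
--         if(idStartMatch[0] == idStart):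
--             for idFinalMatch in idStartMatch[1]:
--                 if (idFinalMatch == idFinal):
--                     return True
--     return False
-- ===== SOURCE B (Python) =====
-- def _isNode(s):
--     # recognize the seven node names by dispatching on the first character
--     if not s:
--         return False
--     c = s[0]
--     if c == 's':
--         return s == 'server' or s == 'switch'
--     if c == 'c':
--         return s == 'client'
--     if c == 'r':
--         return s == 'router'
--     if c == 'f':
--         return s == 'firewall'
--     if c == 'w':
--         return s == 'wan'
--     if c == 't':
--         return s == 'trame'
--     return False
--
-- def canConnect(idStart, idFinal):
--     # every node except the passive 'trame' may start a link, and any node may end one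
--     return _isNode(idStart) and idStart != 'trame' and _isNode(idFinal)
-- ===== Notes on version B (the rewrite author's own statement) =====
-- stated objective: alternative
-- what changed: A's find-key-then-scan over a table of identical rows is replaced by a single first-character-dispatch recognizer for the seven node names, applied to both arguments with the role rule 'any recognized node except trame may start, any recognized node may end'.
import Mathlib
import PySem

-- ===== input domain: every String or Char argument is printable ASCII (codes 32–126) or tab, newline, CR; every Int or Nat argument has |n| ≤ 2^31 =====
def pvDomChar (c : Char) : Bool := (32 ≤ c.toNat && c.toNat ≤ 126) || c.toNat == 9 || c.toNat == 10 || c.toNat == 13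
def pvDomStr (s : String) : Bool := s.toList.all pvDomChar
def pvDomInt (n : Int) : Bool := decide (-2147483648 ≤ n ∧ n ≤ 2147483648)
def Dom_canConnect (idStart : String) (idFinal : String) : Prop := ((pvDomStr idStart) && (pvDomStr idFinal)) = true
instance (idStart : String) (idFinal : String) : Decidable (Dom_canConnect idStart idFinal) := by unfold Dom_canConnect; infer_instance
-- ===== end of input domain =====

-- B replaces A's find-key-then-scan table traversal by a first-character-dispatch
-- recognizer for the seven node names plus the role rule "non-trame node → any node" (alternative).

-- ===== PORT A =====
-- inner loop: 'for idFinalMatch in idStartMatch[1]: if idFinalMatch == idFinal: return True'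
def canConnectInnerA (idFinal : String) : List String → Bool
  | [] => false
  | x :: xs => if x == idFinal then true else canConnectInnerA idFinal xs

-- outer loop over the verification table; falling through the inner loop continues the outer loop
def canConnectOuterA (idStart idFinal : String) : List (String × List String) → Bool
  | [] => false
  | (k, l) :: rest =>
      if k == idStart then
        if canConnectInnerA idFinal l then true else canConnectOuterA idStart idFinal rest
      else canConnectOuterA idStart idFinal rest

def canConnect (idStart : String) (idFinal : String) : Bool :=
  let targets := ["trame", "switch", "router", "firewall", "wan", "server", "client"]
  let verification : List (String × List String) :=
    [("server", targets), ("client", targets), ("router", targets),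
     ("firewall", targets), ("switch", targets), ("wan", targets)]
  canConnectOuterA idStart idFinal verification

-- ===== PORT B =====
-- recognizer for the seven node names, dispatching on the first character (s[0] guarded by the emptiness test)
def canConnectIsNode (s : String) : Bool :=
  match s.toList with
  | [] => false
  | c :: _ =>
      if c == 's' then s == "server" || s == "switch"
      else if c == 'c' then s == "client"
      else if c == 'r' then s == "router"
      else if c == 'f' then s == "firewall"
      else if c == 'w' then s == "wan"
      else if c == 't' then s == "trame"
      else false

def canConnect_alt (idStart : String) (idFinal : String) : Bool :=
  canConnectIsNode idStart && idStart != "trame" && canConnectIsNode idFinal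

-- ===== PRECONDITION & SPEC =====
def Spec_canConnect (idStart : String) (idFinal : String) (out : Bool) : Prop := out = canConnect_alt idStart idFinal
instance (idStart : String) (idFinal : String) (out : Bool) : Decidable (Spec_canConnect idStart idFinal out) := by unfold Spec_canConnect; infer_instance

-- ===== CLAIM (what is proved, stated in full; the proofs are below) =====
def Claim_equal_canConnect : Prop := ∀ (idStart : String) (idFinal : String), Dom_canConnect idStart idFinal → Spec_canConnect idStart idFinal (canConnect idStart idFinal)

-- ===== LEMMAS AND PROOFS =====
-- the inner scan of A is exactly membership of idFinal in the scanned list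
theorem canConnectInnerA_eq_contains (idFinal : String) (l : List String) :
    canConnectInnerA idFinal l = l.contains idFinal := by
  induction l with
  | nil => rfl
  | cons x xs ih =>
      simp only [canConnectInnerA, List.contains_cons, ih, beq_iff_eq]
      by_cases h : x = idFinal
      · simp [h]
      · simp [h, Ne.symm h]

-- (String.mk l).toList = l, stated for simp use below
theorem canConnect_toList_mk (l : List Char) : (String.mk l).toList = l :=
  String.toList_ofList (l := l)

-- the recognizer accepts exactly the seven node names
theorem canConnectIsNode_eq (s : String) :
    canConnectIsNode s =
      (s == "server" || s == "switch" || s == "client" || s == "router" ||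
       s == "firewall" || s == "wan" || s == "trame") := by
  unfold canConnectIsNode
  rcases hs : s.toList with _ | ⟨c, rest⟩ <;>
    have hmk : s = String.mk s.toList := (String.ofList_toList (s := s)).symm
  · rw [hs] at hmk
    subst hmk; decide
  · rw [hs] at hmk
    subst hmk
    clear hs
    by_cases h1 : c = 's' <;> by_cases h2 : c = 'c' <;> by_cases h3 : c = 'r' <;>
      by_cases h4 : c = 'f' <;> by_cases h5 : c = 'w' <;> by_cases h6 : c = 't' <;>
      first
      | (simp_all; done)
      | (rw [Bool.eq_iff_iff]
         simp only [Bool.or_eq_true, beq_iff_eq, String.ext_iff,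
           canConnect_toList_mk, List.cons.injEq]
         simp_all [String.ext_iff, canConnect_toList_mk])

-- ===== VERDICT (by name: the statement is the Claim_ definition above) =====
theorem canConnect_spec : Claim_equal_canConnect := by
  intro idStart idFinal _
  unfold Spec_canConnect canConnect canConnect_alt
  simp only [canConnectOuterA, canConnectInnerA_eq_contains, canConnectIsNode_eq,
    List.contains_cons, List.contains_nil, beq_iff_eq]
  by_cases h1 : idStart = "server" <;> by_cases h2 : idStart = "client" <;>
  by_cases h3 : idStart = "router" <;> by_cases h4 : idStart = "firewall" <;>
  by_cases h5 : idStart = "switch" <;> by_cases h6 : idStart = "wan" <;>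
    simp_all [eq_comm (b := idStart)] <;>
    (rw [Bool.eq_iff_iff]; simp only [Bool.or_eq_true, decide_eq_true_eq, beq_iff_eq]; tauto)
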